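-- pv_equiv track=rewrite | github.com/7seasdotnet/Hexcrawler2 | src/hexcrawler/cli/pygame_viewer.py | _event_trace_entry_matches_context_filters
-- ===== SOURCE A (Python) =====
-- from typing import Any
--
-- def _event_trace_entry_matches_context_filters(
--     entry: dict[str, Any],
--     context_filters: dict[str, frozenset[str]],
-- ) -> bool:
--     if not context_filters:
--         return False
--     params = entry.get("params") if isinstance(entry.get("params"), dict) else {}
--     for key, allowed_values in context_filters.items():
--         value = params.get(key)
--         if isinstance(value, str) and value in allowed_values:
--             return True
--     return False
-- ===== SOURCE B (Python) =====
-- def _event_trace_entry_matches_context_filters(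
--     entry,
--     context_filters,
-- ):
--     params = entry.get("params") if isinstance(entry.get("params"), dict) else {}
--     wanted = {(k, v) for k, allowed in context_filters.items() for v in allowed}
--     return any(isinstance(v, str) and (k, v) in wanted
--                for k, v in params.items())
-- ===== Notes on version B (the rewrite author's own statement) =====
-- stated objective: alternative
-- what changed: B flattens context_filters into one set of (key, value) pairs and answers with a single any() membership scan over params.items(), replacing A's loop over the filters with per-key lookups into params.
import Mathlib
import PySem

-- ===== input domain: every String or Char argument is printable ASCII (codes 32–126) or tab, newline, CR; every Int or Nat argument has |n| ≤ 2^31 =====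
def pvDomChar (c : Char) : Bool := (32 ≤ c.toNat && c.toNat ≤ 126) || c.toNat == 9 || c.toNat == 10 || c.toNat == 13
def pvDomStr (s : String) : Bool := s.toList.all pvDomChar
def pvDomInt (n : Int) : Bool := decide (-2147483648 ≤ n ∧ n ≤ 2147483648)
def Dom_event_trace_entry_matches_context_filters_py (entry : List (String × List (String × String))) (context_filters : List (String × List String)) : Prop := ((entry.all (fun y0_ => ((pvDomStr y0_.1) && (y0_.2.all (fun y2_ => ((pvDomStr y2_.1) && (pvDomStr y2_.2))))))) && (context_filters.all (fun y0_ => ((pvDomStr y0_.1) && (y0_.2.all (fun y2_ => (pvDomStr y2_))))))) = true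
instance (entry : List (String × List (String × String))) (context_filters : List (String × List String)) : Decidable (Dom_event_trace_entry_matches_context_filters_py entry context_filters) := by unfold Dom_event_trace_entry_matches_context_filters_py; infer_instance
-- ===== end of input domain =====

-- B flattens context_filters into one flat set of (key, value) pairs and does a single
-- membership scan over params, instead of A's loop over filters with lookups into params;
-- return value only, no side effects; objective: alternative.


-- ===== PORT A =====
-- dict.get(key): first-match lookup in an insertion-ordered association list
def dget {α : Type} (l : List (String × α)) (k : String) : Option α :=
  (l.find? (fun p => p.1 == k)).map (·.2)

-- the loop `for key, allowed_values in context_filters.items(): …`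
def goA (params : List (String × String)) : List (String × List String) → Bool
  | [] => false
  | (key, allowed) :: rest =>
    match dget params key with
    | some v => if allowed.contains v then true else goA params rest
    | none => goA params rest       -- value is None: `isinstance(value, str)` is False

def event_trace_entry_matches_context_filters_py (entry : List (String × List (String × String))) (context_filters : List (String × List String)) : Bool :=
  if context_filters.isEmpty then false
  else
    -- entry.get("params") is a dict whenever present (type convention), else {}
    let params := (dget entry "params").getD []
    goA params context_filters

-- ===== PORT B =====
-- `wanted = {(k, v) for k, allowed in context_filters.items() for v in allowed}`, then
-- `any((k, v) in wanted for k, v in params.items())` (isinstance guard always true on the typed domain)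
def event_trace_entry_matches_context_filters_py_alt (entry : List (String × List (String × String))) (context_filters : List (String × List String)) : Bool :=
  let params := (List.lookup "params" entry).getD []
  let wanted : PySem.Set (String × String) :=
    PySem.Set.ofList (context_filters.flatMap (fun p => p.2.map (fun v => (p.1, v))))
  params.any (fun q => wanted.contains q)

-- ===== PRECONDITION & SPEC =====
-- Pre_ excludes association lists whose params dict carries a duplicate key: such a list does
-- not encode any Python dict (dict keys are unique), and first-match lookup order would make
-- either answer accidental.
def Pre_event_trace_entry_matches_context_filters_py (entry : List (String × List (String × String))) (context_filters : List (String × List String)) : Prop :=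
  (((dget entry "params").getD []).map Prod.fst).Nodup
instance (entry : List (String × List (String × String))) (context_filters : List (String × List String)) : Decidable (Pre_event_trace_entry_matches_context_filters_py entry context_filters) := by unfold Pre_event_trace_entry_matches_context_filters_py; infer_instance

def pvWitness_event_trace_entry_matches_context_filters_py : (List (String × List (String × String))) × (List (String × List String)) :=
  ([("params", [("biome", "forest"), ("actor", "pc")])], [("biome", ["forest", "hills"])])

def Spec_event_trace_entry_matches_context_filters_py (entry : List (String × List (String × String))) (context_filters : List (String × List String)) (out : Bool) : Prop := out = event_trace_entry_matches_context_filters_py_alt entry context_filters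
instance (entry : List (String × List (String × String))) (context_filters : List (String × List String)) (out : Bool) : Decidable (Spec_event_trace_entry_matches_context_filters_py entry context_filters out) := by unfold Spec_event_trace_entry_matches_context_filters_py; infer_instance

-- ===== CLAIM (what is proved, stated in full; the proofs are below) =====
def Claim_equal_event_trace_entry_matches_context_filters_py : Prop := ∀ (entry : List (String × List (String × String))) (context_filters : List (String × List String)), Dom_event_trace_entry_matches_context_filters_py entry context_filters → Pre_event_trace_entry_matches_context_filters_py entry context_filters → Spec_event_trace_entry_matches_context_filters_py entry context_filters (event_trace_entry_matches_context_filters_py entry context_filters)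

-- ===== LEMMAS AND PROOFS =====
theorem lookup_eq_dget {α : Type} (l : List (String × α)) (k : String) :
    List.lookup k l = dget l k := by
  induction l with
  | nil => rfl
  | cons p rest ih =>
    obtain ⟨pk, pv⟩ := p
    by_cases h : pk = k
    · subst h; simp [List.lookup, dget]
    · have h1 : (k == pk) = false := by simp [Ne.symm h]
      have h2 : (pk == k) = false := by simp [h]
      simpa [List.lookup, dget, h1, h2] using ih

theorem dget_eq_some_iff {α : Type} {l : List (String × α)} (hnd : (l.map Prod.fst).Nodup) {k : String} {v : α} :
    dget l k = some v ↔ (k, v) ∈ l := by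
  induction l with
  | nil => simp [dget]
  | cons p rest ih =>
    obtain ⟨pk, pv⟩ := p
    obtain ⟨hk, hnd'⟩ := by simpa using hnd
    by_cases h : pk = k
    · subst h
      simp only [dget, List.find?_cons, BEq.rfl, Option.map_some, List.mem_cons,
        Option.some.injEq, Prod.mk.injEq, true_and]
      constructor
      · rintro rfl; exact Or.inl rfl
      · rintro (rfl | hmem)
        · rfl
        · exact absurd hmem (hk v)
    · have hb : (pk == k) = false := by simp [h]
      simp only [dget, List.find?_cons, hb, List.mem_cons]
      rw [show (Option.map (fun x => x.2) (List.find? (fun p => p.1 == k) rest) = some v ↔ (k, v) ∈ rest) from ih hnd']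
      constructor
      · exact Or.inr
      · rintro (h' | h')
        · exact absurd (congrArg Prod.fst h').symm h
        · exact h'

theorem goA_eq_true_iff (params : List (String × String)) (cf : List (String × List String)) :
    goA params cf = true ↔ ∃ k a, (k, a) ∈ cf ∧ ∃ v, dget params k = some v ∧ a.contains v = true := by
  induction cf with
  | nil => simp [goA]
  | cons p rest ih =>
    obtain ⟨key, allowed⟩ := p
    simp only [goA]
    cases h : dget params key with
    | none =>
      rw [ih]
      constructor
      · rintro ⟨k, a, hm, hv⟩; exact ⟨k, a, List.mem_cons_of_mem _ hm, hv⟩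
      · rintro ⟨k, a, hm, v, hg, hc⟩
        rcases List.mem_cons.mp hm with h' | h'
        · injection h' with h1 h2; subst h1; rw [h] at hg; cases hg
        · exact ⟨k, a, h', v, hg, hc⟩
    | some v =>
      dsimp only
      by_cases hc : allowed.contains v = true
      · rw [if_pos hc]
        simp only [true_iff]
        exact ⟨key, allowed, List.mem_cons_self, v, h, hc⟩
      · rw [if_neg hc, ih]
        constructor
        · rintro ⟨k, a, hm, hv⟩; exact ⟨k, a, List.mem_cons_of_mem _ hm, hv⟩
        · rintro ⟨k, a, hm, w, hg, hcw⟩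
          rcases List.mem_cons.mp hm with h' | h'
          · injection h' with h1 h2; subst h1; subst h2
            rw [h] at hg; injection hg with h3; subst h3; exact absurd hcw hc
          · exact ⟨k, a, h', w, hg, hcw⟩

theorem alt_eq_true_iff (entry : List (String × List (String × String))) (cf : List (String × List String)) :
    event_trace_entry_matches_context_filters_py_alt entry cf = true ↔
      ∃ k v, (k, v) ∈ (dget entry "params").getD [] ∧ ∃ a, (k, a) ∈ cf ∧ a.contains v = true := by
  unfold event_trace_entry_matches_context_filters_py_alt
  rw [lookup_eq_dget]
  simp only [List.any_eq_true, PySem.Set.contains, List.contains_iff_mem,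
    PySem.Set.mem_ofList, List.mem_flatMap, List.mem_map]
  constructor
  · rintro ⟨x, hm, ⟨k', a⟩, hcf, w, hw, heq⟩
    subst heq
    exact ⟨k', w, hm, a, hcf, hw⟩
  · rintro ⟨k, v, hm, a, hcf, hc⟩
    exact ⟨(k, v), hm, ⟨(k, a), hcf, v, hc, rfl⟩⟩

-- ===== VERDICT (by name: the statement is the Claim_ definition above) =====
theorem event_trace_entry_matches_context_filters_py_spec : Claim_equal_event_trace_entry_matches_context_filters_py := by
  intro entry cf _ hpre
  unfold Spec_event_trace_entry_matches_context_filters_py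
  unfold Pre_event_trace_entry_matches_context_filters_py at hpre
  rw [Bool.eq_iff_iff, alt_eq_true_iff]
  unfold event_trace_entry_matches_context_filters_py
  cases cf with
  | nil => simp
  | cons p rest =>
    simp only [List.isEmpty_cons, if_neg (by decide : ¬ (false = true))]
    rw [goA_eq_true_iff]
    constructor
    · rintro ⟨k, a, hm, v, hg, hc⟩
      exact ⟨k, v, (dget_eq_some_iff hpre).mp hg, a, hm, hc⟩
    · rintro ⟨k, v, hm, a, hcf, hc⟩
      exact ⟨k, a, hcf, v, (dget_eq_some_iff hpre).mpr hm, hc⟩
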